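-- pv_equiv track=rewrite | github.com/pypi-data/pypi-mirror-403 | packages/pygraft-gen/pygraft_gen-0.0.11.tar.gz/pygraft_gen-0.0.11/src/pygraft/utils/schema.py | get_all_superclasses
-- ===== SOURCE A (Python) =====
-- from collections.abc import Mapping, Sequence
--
-- def get_all_superclasses(
--     class_name: str,
--     direct_class2superclass: Mapping[str, str],
-- ) -> list[str]:
--     """Returns a list of all superclasses of a given class.
--
--     Args:
--         class_name (str): The name of the class.
--         direct_class2superclass (dict): A dictionary mapping classes to their direct superclasses.
--
--     Returns:
--         list: A list of all superclasses of the given class.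
--     """
--     superclasses: list[str] = []
--
--     if class_name in direct_class2superclass:
--         superclass: str = direct_class2superclass[class_name]
--         superclasses.append(superclass)
--         superclasses.extend(
--             get_all_superclasses(superclass, direct_class2superclass),
--         )
--
--     return superclasses
-- ===== SOURCE B (Python) =====
-- def get_all_superclasses(class_name, direct_class2superclass):
--     """Two staged passes: first count the chain depth, then materialize the
--     superclass list with a for-loop over range(depth)."""
--     depth = 0
--     cur = class_name
--     while cur in direct_class2superclass:
--         depth += 1
--         cur = direct_class2superclass[cur]
--     superclasses = []
--     cur = class_name
--     for _ in range(depth):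
--         cur = direct_class2superclass[cur]
--         superclasses.append(cur)
--     return superclasses
-- ===== Notes on version B (the rewrite author's own statement) =====
-- stated objective: alternative
-- what changed: Replaced the recursive descent (append head, recurse, extend) by two staged iterative passes: a while loop that only counts the chain depth, then a for-loop over range(depth) that materializes the list.
import Mathlib
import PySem

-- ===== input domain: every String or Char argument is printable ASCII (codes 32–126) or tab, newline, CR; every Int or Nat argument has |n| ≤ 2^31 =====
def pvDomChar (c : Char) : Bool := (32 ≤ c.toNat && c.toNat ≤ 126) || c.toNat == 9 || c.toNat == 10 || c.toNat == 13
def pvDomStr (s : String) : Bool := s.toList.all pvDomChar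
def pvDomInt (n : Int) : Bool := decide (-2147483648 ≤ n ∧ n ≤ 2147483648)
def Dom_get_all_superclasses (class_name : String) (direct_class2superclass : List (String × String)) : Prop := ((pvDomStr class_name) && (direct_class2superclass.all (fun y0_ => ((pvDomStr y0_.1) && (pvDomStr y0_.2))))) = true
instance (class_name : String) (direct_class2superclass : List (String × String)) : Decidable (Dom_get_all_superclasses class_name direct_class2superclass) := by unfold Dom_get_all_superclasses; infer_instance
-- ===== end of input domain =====

-- B replaces A's recursive descent by two staged iterative passes: a while loop counting
-- the chain depth, then a for-loop over range(depth) materializing the list ("alternative").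
-- ===== PORT A =====
-- Recursive descent of A; the fuel argument only makes the recursion total in Lean
-- (inside Pre_ the chain ends before the fuel runs out, so it never truncates).
def pvChainA (m : PySem.Dict String String) : Nat → String → List String
  | 0, _ => []
  | fuel + 1, c =>
    match m.get? c with
    | none => []
    | some s => s :: pvChainA m fuel s

def get_all_superclasses (class_name : String) (direct_class2superclass : List (String × String)) : List String :=
  pvChainA (PySem.Dict.ofList direct_class2superclass) (direct_class2superclass.length + 1) class_name

-- ===== PORT B =====
-- Stage 1 of B: the while loop counting the chain depth (fuel makes it total).
def pvDepthB (m : PySem.Dict String String) : Nat → String → Nat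
  | 0, _ => 0
  | fuel + 1, c =>
    match m.get? c with
    | none => 0
    | some s => pvDepthB m fuel s + 1

def get_all_superclasses_alt (class_name : String) (direct_class2superclass : List (String × String)) : List String :=
  let m := PySem.Dict.ofList direct_class2superclass
  let depth := pvDepthB m (direct_class2superclass.length + 1) class_name
  -- Stage 2 of B: for _ in range(depth): cur = d[cur]; superclasses.append(cur)
  ((PySem.List.pyRange 0 depth 1).foldl
    (fun (st : String × List String) _ =>
      let s := (m.get? st.1).getD ""   -- lookup always succeeds within depth steps
      (s, st.2 ++ [s]))
    (class_name, [])).2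

-- ===== PRECONDITION & SPEC =====
-- node reached after i successful lookups along the chain (none once the chain has ended)
def pvIterStep (m : PySem.Dict String String) : Nat → String → Option String
  | 0, c => some c
  | n + 1, c => (pvIterStep m n c).bind (fun x => m.get? x)
-- Pre_ excludes exactly the cyclic chains, on which Python A raises RecursionError
-- (and Python B's counting loop never terminates): the chain must end within length+1 steps.
def Pre_get_all_superclasses (class_name : String) (direct_class2superclass : List (String × String)) : Prop :=
  pvIterStep (PySem.Dict.ofList direct_class2superclass) (direct_class2superclass.length + 1) class_name = none
instance (class_name : String) (direct_class2superclass : List (String × String)) : Decidable (Pre_get_all_superclasses class_name direct_class2superclass) := by unfold Pre_get_all_superclasses; infer_instance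
def pvWitness_get_all_superclasses : String × (List (String × String)) := ("A", [("A", "B"), ("B", "C")])

def Spec_get_all_superclasses (class_name : String) (direct_class2superclass : List (String × String)) (out : List String) : Prop := out = get_all_superclasses_alt class_name direct_class2superclass
instance (class_name : String) (direct_class2superclass : List (String × String)) (out : List String) : Decidable (Spec_get_all_superclasses class_name direct_class2superclass out) := by unfold Spec_get_all_superclasses; infer_instance

-- ===== CLAIM =====
def Claim_equal_get_all_superclasses : Prop := ∀ (class_name : String) (direct_class2superclass : List (String × String)), Dom_get_all_superclasses class_name direct_class2superclass → Pre_get_all_superclasses class_name direct_class2superclass → Spec_get_all_superclasses class_name direct_class2superclass (get_all_superclasses class_name direct_class2superclass)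

-- ===== LEMMAS AND PROOFS =====
-- stage 2's fold over any n-element list replays A's chain when n = depth
theorem pvFoldB_eq_chainA (m : PySem.Dict String String) (fuel : Nat) (c : String)
    (acc : List String) (L : List Int) (hL : L.length = pvDepthB m fuel c) :
    (L.foldl (fun (st : String × List String) _ =>
        ((m.get? st.1).getD "", st.2 ++ [(m.get? st.1).getD ""]))
      (c, acc)).2 = acc ++ pvChainA m fuel c := by
  induction fuel generalizing c acc L with
  | zero =>
    simp [pvDepthB, List.length_eq_zero_iff] at hL
    simp [hL, pvChainA]
  | succ f ih =>
    simp only [pvDepthB, pvChainA] at *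
    cases hm : m.get? c with
    | none =>
      simp only [hm, List.length_eq_zero_iff] at hL
      simp [hL]
    | some s =>
      simp only [hm] at hL
      cases L with
      | nil => simp at hL
      | cons x xs =>
        simp only [List.length_cons, Nat.succ_inj] at hL
        simp only [List.foldl_cons, hm, Option.getD_some]
        rw [ih s (acc ++ [s]) xs hL]
        simp

-- ===== VERDICT =====
theorem get_all_superclasses_spec : Claim_equal_get_all_superclasses := by
  intro class_name d _ _
  unfold Spec_get_all_superclasses get_all_superclasses get_all_superclasses_alt
  rw [pvFoldB_eq_chainA (PySem.Dict.ofList d) (d.length + 1) class_name []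
        (PySem.List.pyRange 0 (pvDepthB (PySem.Dict.ofList d) (d.length + 1) class_name) 1)
        (by rw [PySem.List.length_pyRange_one]; simp)]
  simp
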